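-- pv_equiv track=rewrite | github.com/clejae/alkis_analysis | 03_owner_name_classification.py | check_occ_of_words1
-- ===== SOURCE A (Python) =====
-- def check_occ_of_words1(text, search_terms, return_code):
--     """
--     Checks if any of the search terms from the input list occurs in the text. Only returns a true (1), if an entire
--     word from the text matches any search term, i.e. if a sub part of a word fits the search terms the return will be
--     false (0). Example: If the search term is "py" and the text is "python", there will be no match. Only "python" will
--     be matched with "python".
--
--     :param text: Input text. String.
--     :param search_terms: List of word that should be looked for. List of strings.
--     :return: Boolean integer. 1: there is a match, 0: there is no match.
--     """
--
--     check = 0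
--
--     if text != None:
--         text = text.replace(',', ' ')
--         str_lst = text.split(" ")
--         for search_term in search_terms:
--             if search_term in str_lst:
--                 check = return_code
--                 break
--             else:
--                 pass
--     else:
--         pass
--
--     return check
-- ===== SOURCE B (Python) =====
-- def check_occ_of_words1(text, search_terms, return_code):
--     if text is None:
--         return 0
--     terms = set(search_terms)
--     word = []
--     for ch in text:
--         if ch == ' ' or ch == ',':
--             if ''.join(word) in terms:
--                 return return_code
--             word = []
--         else:
--             word.append(ch)
--     return return_code if ''.join(word) in terms else 0
-- ===== Notes on version B (the rewrite author's own statement) =====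
-- stated objective: alternative
-- what changed: Replaces the per-term loop over a pre-split word list by a single character-level scan of the text with a word buffer, checking each completed word against a hash set of the search terms and returning early on the first hit.
import Mathlib
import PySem

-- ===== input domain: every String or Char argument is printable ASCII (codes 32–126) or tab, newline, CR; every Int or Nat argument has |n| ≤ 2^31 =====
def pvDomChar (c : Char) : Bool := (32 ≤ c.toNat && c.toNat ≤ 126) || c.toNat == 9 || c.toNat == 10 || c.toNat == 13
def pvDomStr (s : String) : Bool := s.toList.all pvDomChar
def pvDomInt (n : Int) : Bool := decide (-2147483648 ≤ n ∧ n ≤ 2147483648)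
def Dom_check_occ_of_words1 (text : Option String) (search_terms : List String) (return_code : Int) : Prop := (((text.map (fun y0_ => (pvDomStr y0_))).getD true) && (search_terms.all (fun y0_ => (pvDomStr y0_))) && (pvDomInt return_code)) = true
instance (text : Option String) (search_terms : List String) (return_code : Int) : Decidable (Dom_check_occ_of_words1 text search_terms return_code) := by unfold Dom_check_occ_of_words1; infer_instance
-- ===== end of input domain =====

-- B replaces A's per-term loop over a pre-split word list by a single character-level scan
-- of the text with a word buffer, checking each completed word against a set of the terms
-- and returning early (alternative decomposition; same return value).

-- ===== PORT A =====
def checkOccLoopA (str_lst : List String) (return_code : Int) : List String → Int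
  | [] => 0
  | search_term :: rest =>
      if str_lst.contains search_term then return_code
      else checkOccLoopA str_lst return_code rest

def check_occ_of_words1 (text : Option String) (search_terms : List String) (return_code : Int) : Int :=
  match text with
  | none => 0
  | some t =>
      let t' := PySem.Str.replace t "," " "
      let str_lst := (PySem.Str.split? t' " ").getD []
      checkOccLoopA str_lst return_code search_terms

-- ===== PORT B =====
-- for ch in text: buffer the char, flush & test the word at ' ' or ','; test the last word at the end
def scanB (terms : PySem.Set String) (return_code : Int) : List Char → List Char → Int
  | [], buf => if terms.contains (String.ofList buf.reverse) then return_code else 0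
  | c :: rest, buf =>
      if c = ' ' ∨ c = ',' then
        if terms.contains (String.ofList buf.reverse) then return_code
        else scanB terms return_code rest []
      else scanB terms return_code rest (c :: buf)

def check_occ_of_words1_alt (text : Option String) (search_terms : List String) (return_code : Int) : Int :=
  match text with
  | none => 0
  | some t => scanB (PySem.Set.ofList search_terms) return_code t.toList []

-- ===== PRECONDITION & SPEC =====
def Spec_check_occ_of_words1 (text : Option String) (search_terms : List String) (return_code : Int) (out : Int) : Prop := out = check_occ_of_words1_alt text search_terms return_code
instance (text : Option String) (search_terms : List String) (return_code : Int) (out : Int) : Decidable (Spec_check_occ_of_words1 text search_terms return_code out) := by unfold Spec_check_occ_of_words1; infer_instance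

-- ===== CLAIM (what is proved, stated in full; the proofs are below) =====
def Claim_equal_check_occ_of_words1 : Prop := ∀ (text : Option String) (search_terms : List String) (return_code : Int), Dom_check_occ_of_words1 text search_terms return_code → Spec_check_occ_of_words1 text search_terms return_code (check_occ_of_words1 text search_terms return_code)

-- ===== LEMMAS AND PROOFS =====

-- substitution performed by text.replace(',', ' ')
def subC (c : Char) : Char := if c = ',' then ' ' else c

-- words of a char list split on ' ' (cur is the reversed current buffer)
def spWords : List Char → List Char → List (List Char)
  | [], cur => [cur.reverse]
  | c :: t, cur => if c = ' ' then cur.reverse :: spWords t [] else spWords t (c :: cur)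

-- words of the ORIGINAL char list split on ' ' or ',' (B's view)
def scWords : List Char → List Char → List (List Char)
  | [], cur => [cur.reverse]
  | c :: t, cur => if c = ' ' ∨ c = ',' then cur.reverse :: scWords t [] else scWords t (c :: cur)

lemma replace_go_comma (fuel : ℕ) : ∀ (l acc : List Char), l.length ≤ fuel →
    PySem.Chars.replace.go [','] [' '] fuel l acc = acc.reverse ++ l.map subC := by
  induction fuel with
  | zero =>
      intro l acc h
      have : l = [] := List.eq_nil_of_length_eq_zero (Nat.le_zero.mp h)
      subst this; simp [PySem.Chars.replace.go]
  | succ f ih =>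
      intro l acc h
      cases l with
      | nil => simp [PySem.Chars.replace.go]
      | cons c rest =>
          by_cases hc : c = ','
          · subst hc
            have hp : ([','].isPrefixOf (',' :: rest)) = true := by
              simp [List.isPrefixOf]
            simp only [PySem.Chars.replace.go, hp, if_pos]
            show PySem.Chars.replace.go [','] [' '] f rest (' ' :: acc) = _
            rw [ih rest (' ' :: acc) (by simpa using Nat.lt_succ_iff.mp (by simpa using h))]
            simp [subC]
          · have hp : ([','].isPrefixOf (c :: rest)) = false := by
              simp [List.isPrefixOf]; exact fun h' => hc h'.symm
            simp only [PySem.Chars.replace.go, hp]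
            show PySem.Chars.replace.go [','] [' '] f rest (c :: acc) = _
            rw [ih rest (c :: acc) (by simpa using Nat.lt_succ_iff.mp (by simpa using h))]
            simp [subC, hc]

lemma replace_comma (l : List Char) :
    PySem.Chars.replace l [','] [' '] = l.map subC := by
  simp only [PySem.Chars.replace, List.isEmpty, reduceCtorEq, if_false]
  simpa using replace_go_comma l.length l [] le_rfl

lemma splitOn_go_space (fuel : ℕ) : ∀ (l cur : List Char) (acc : List (List Char)), l.length < fuel →
    PySem.Chars.splitOn.go [' '] fuel l cur acc = acc.reverse ++ spWords l cur := by
  induction fuel with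
  | zero => intro l cur acc h; omega
  | succ f ih =>
      intro l cur acc h
      cases l with
      | nil => simp [PySem.Chars.splitOn.go, spWords]
      | cons c rest =>
          by_cases hc : c = ' '
          · subst hc
            have hp : ([' '].isPrefixOf (' ' :: rest)) = true := by
              simp [List.isPrefixOf]
            simp only [PySem.Chars.splitOn.go, hp, if_pos]
            show PySem.Chars.splitOn.go [' '] f rest [] (cur.reverse :: acc) = _
            rw [ih rest [] (cur.reverse :: acc) (by simpa using Nat.lt_succ_iff.mp h)]
            simp [spWords]
          · have hp : ([' '].isPrefixOf (c :: rest)) = false := by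
              simp [List.isPrefixOf]; exact fun h' => hc h'.symm
            simp only [PySem.Chars.splitOn.go, hp]
            show PySem.Chars.splitOn.go [' '] f rest (c :: cur) acc = _
            rw [ih rest (c :: cur) acc (by simpa using Nat.lt_succ_iff.mp h)]
            simp [spWords, hc]

lemma splitOn_space (l : List Char) :
    PySem.Chars.splitOn l [' '] = spWords l [] := by
  simpa using splitOn_go_space (l.length + 1) l [] [] (Nat.lt_succ_self _)

lemma spWords_map_subC (l : List Char) : ∀ cur, spWords (l.map subC) cur = scWords l cur := by
  induction l with
  | nil => intro cur; simp [spWords, scWords]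
  | cons c t ih =>
      intro cur
      by_cases hd : c = ' ' ∨ c = ','
      · have hs : subC c = ' ' := by
          rcases hd with h | h <;> subst h <;> simp [subC]
        simp [spWords, scWords, hs, hd, ih]
      · have hs : subC c = c := by
          simp [subC]; intro h; exact absurd (Or.inr h) hd
        have hcs : ¬ c = ' ' := fun h => hd (Or.inl h)
        have hcc : ¬ c = ',' := fun h => hd (Or.inr h)
        simp [spWords, scWords, hs, hcs, hcc, ih]

lemma loopA_eq (str_lst : List String) (rc : Int) (terms : List String) :
    checkOccLoopA str_lst rc terms = if terms.any (fun t => str_lst.contains t) then rc else 0 := by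
  induction terms with
  | nil => simp [checkOccLoopA]
  | cons h tl ih =>
      simp only [checkOccLoopA]
      rw [ih]
      by_cases hc : str_lst.contains h = true <;> simp at * <;> simp [hc]

lemma scanB_eq (terms : PySem.Set String) (rc : Int) (l : List Char) : ∀ buf,
    scanB terms rc l buf =
      if (scWords l buf).any (fun w => terms.contains (String.ofList w)) then rc else 0 := by
  induction l with
  | nil => intro buf; simp [scanB, scWords]
  | cons c t ih =>
      intro buf
      by_cases hd : c = ' ' ∨ c = ','
      · simp only [scanB, scWords, if_pos hd, ih, List.any_cons]
        by_cases hb : terms.contains (String.ofList buf.reverse) = true <;>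
          simp only [PySem.Set.contains, List.contains_iff_mem] at hb <;> simp [hb]
      · simp only [scanB, scWords, if_neg hd, ih]

lemma any_mem_equiv (terms : List String) (ws : List (List Char)) :
    terms.any (fun s => (ws.map String.ofList).contains s)
      = ws.any (fun w => (PySem.Set.ofList terms).contains (String.ofList w)) := by
  rw [Bool.eq_iff_iff]
  simp only [List.any_eq_true, List.contains_iff_mem, List.mem_map, PySem.Set.contains,
    ← PySem.Set.mem_ofList (xs := terms)]
  constructor
  · rintro ⟨s, hs, w, hw, rfl⟩; exact ⟨w, hw, hs⟩
  · rintro ⟨w, hw, hs⟩; exact ⟨String.ofList w, hs, w, hw, rfl⟩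

-- ===== VERDICT (by name: the statement is the Claim_ definition above) =====
theorem check_occ_of_words1_spec : Claim_equal_check_occ_of_words1 := by
  intro text search_terms rc _
  unfold Spec_check_occ_of_words1
  cases text with
  | none => rfl
  | some t =>
      simp only [check_occ_of_words1, check_occ_of_words1_alt, loopA_eq, scanB_eq]
      have hrep : (PySem.Str.replace t "," " ").toList = t.toList.map subC := by
        rw [PySem.Str.toList_replace]
        show PySem.Chars.replace t.toList [','] [' '] = _
        exact replace_comma t.toList
      have hsplit : (PySem.Str.split? (PySem.Str.replace t "," " ") " ").getD []
          = (scWords t.toList []).map String.ofList := by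
        simp only [PySem.Str.split?, hrep]
        show (Option.map _ (PySem.Chars.split? (t.toList.map subC) [' '])).getD [] = _
        simp [PySem.Chars.split?, splitOn_space, spWords_map_subC]
      rw [hsplit, any_mem_equiv]
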